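-- pv_equiv track=rewrite | github.com/oamg/leapp | leapp/messaging/answerstore.py | _comment_out
-- ===== SOURCE A (Python) =====
-- def _comment_out(key, text):
--     """Returns a commented-out string. If any newlines are present it properly deals with them"""
--     text = str(text)
--     split_by_newline = [s for s in text.split('\n') if s.strip()]
--     res = '# {key:<20}{line1}\n{linesN}'.format(key='{}:'.format(key) if key else '',
--                                                 line1=split_by_newline[0],
--                                                 linesN=''.join([_comment_out('', line)
--                                                                 for line in split_by_newline[1:]]))
--     return res
-- ===== SOURCE B (Python) =====
-- def _comment_out(key, text):
--     """Returns a commented-out string. If any newlines are present it properly deals with them"""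
--     lines = [s for s in str(text).split('\n') if s.strip()]
--     header = '{}:'.format(key) if key else ''
--     return ''.join('# {:<20}{}\n'.format(header if i == 0 else '', line)
--                    for i, line in enumerate(lines))
-- ===== Notes on version B (the rewrite author's own statement) =====
-- stated objective: idiomatic
-- what changed: B replaces A's self-recursive call per extra line (each spawning a fresh split/filter/format pass) with a single join over one enumerate pass that formats every non-blank line directly, picking the header only at index 0.
import Mathlib
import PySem

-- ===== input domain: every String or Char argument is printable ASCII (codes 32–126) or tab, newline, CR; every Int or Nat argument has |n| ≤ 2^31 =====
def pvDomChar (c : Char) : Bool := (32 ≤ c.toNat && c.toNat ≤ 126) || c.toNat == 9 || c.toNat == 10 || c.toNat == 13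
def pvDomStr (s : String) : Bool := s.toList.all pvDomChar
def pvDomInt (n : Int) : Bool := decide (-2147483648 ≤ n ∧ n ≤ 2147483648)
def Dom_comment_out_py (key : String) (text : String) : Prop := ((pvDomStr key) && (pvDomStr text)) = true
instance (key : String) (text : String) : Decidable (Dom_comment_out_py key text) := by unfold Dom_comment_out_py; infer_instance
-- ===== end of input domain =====

-- B replaces A's per-line self-recursion by one enumerate-and-join pass; objective: idiomatic.

-- ===== PORT A =====
-- '{:<20}'.format(s): left-justify to width 20
def pvPad20 (s : List Char) : List Char := s ++ List.replicate (20 - s.length) ' '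

-- _comment_out, recursion made total with a fuel counter (the recursion only ever goes
-- one level deep, onto newline-free lines, so the fuel is never exhausted on any input)
def pvGoA : Nat → String → List Char → List Char
  | 0, _, _ => []
  | fuel+1, key, text =>
    let lines := (PySem.Chars.splitOn text ['\n']).filter
                   (fun s => !(PySem.Chars.strip s).isEmpty)
    "# ".toList
      ++ pvPad20 (if key ≠ "" then key.toList ++ [':'] else [])
      ++ ((PySem.List.pyGet? lines 0).getD [])   -- lines[0]; none (IndexError) excluded by Pre_
      ++ ['\n']
      ++ PySem.Chars.join []
           ((PySem.List.slice lines (some 1) none).map (fun line => pvGoA fuel "" line))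

def comment_out_py (key : String) (text : String) : String :=
  String.mk (pvGoA (text.toList.length + 1) key text.toList)

-- ===== PORT B =====
-- '# {:<20}{}\n'.format(hdr, line)
def pvFmtLine (hdr line : List Char) : List Char :=
  "# ".toList ++ (hdr ++ List.replicate (20 - hdr.length) ' ') ++ line ++ ['\n']

def comment_out_py_alt (key : String) (text : String) : String :=
  let lines := (PySem.Chars.splitOn text.toList ['\n']).filter
                 (fun s => !(PySem.Chars.strip s).isEmpty)
  let header : List Char := if key ≠ "" then key.toList ++ [':'] else []
  String.mk (PySem.Chars.join []
    ((PySem.List.enumerate lines).map (fun p => pvFmtLine (if p.1 == 0 then header else []) p.2)))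

-- ===== PRECONDITION & SPEC =====
-- A raises IndexError iff every character of text is whitespace (then no line survives
-- the .strip() filter); Pre_ admits exactly the inputs with some non-whitespace character.
def Pre_comment_out_py (key : String) (text : String) : Prop :=
  text.toList.any (fun c => !PySem.Chars.isspace c) = true
instance (key : String) (text : String) : Decidable (Pre_comment_out_py key text) := by
  unfold Pre_comment_out_py; infer_instance

def pvWitness_comment_out_py : String × String := ("answer", "yes\n  no\n \n")

def Spec_comment_out_py (key : String) (text : String) (out : String) : Prop :=
  out = comment_out_py_alt key text
instance (key : String) (text : String) (out : String) : Decidable (Spec_comment_out_py key text out) := by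
  unfold Spec_comment_out_py; infer_instance

-- ===== CLAIM (what is proved, stated in full; the proofs are below) =====
def Claim_equal_comment_out_py : Prop := ∀ (key : String) (text : String), Dom_comment_out_py key text → Pre_comment_out_py key text → Spec_comment_out_py key text (comment_out_py key text)

-- ===== LEMMAS AND PROOFS =====

-- splitOn.go carries its accumulator passively
theorem pvGoAcc (fuel : Nat) : ∀ (l cur : List Char) (acc : List (List Char)),
    PySem.Chars.splitOn.go ['\n'] fuel l cur acc
      = acc.reverse ++ PySem.Chars.splitOn.go ['\n'] fuel l cur [] := by
  induction fuel with
  | zero => intro l cur acc; simp [PySem.Chars.splitOn.go]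
  | succ f ih =>
    intro l cur acc
    cases l with
    | nil => simp [PySem.Chars.splitOn.go]
    | cons c rest =>
      simp only [PySem.Chars.splitOn.go]
      split_ifs with h
      · simp only [show (['\n'] : List Char).length = 1 from rfl, List.drop_succ_cons,
          List.drop_zero]
        rw [ih rest [] (cur.reverse :: acc), ih rest [] [cur.reverse]]
        simp
      · exact ih rest (c :: cur) acc

-- a newline-free remainder yields exactly one piece
theorem pvGoNoNl (fuel : Nat) : ∀ (l cur : List Char), '\n' ∉ l →
    PySem.Chars.splitOn.go ['\n'] fuel l cur [] = [cur.reverse ++ l] := by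
  induction fuel with
  | zero => intro l cur _; simp [PySem.Chars.splitOn.go]
  | succ f ih =>
    intro l cur hl
    cases l with
    | nil => simp [PySem.Chars.splitOn.go]
    | cons c rest =>
      have hc : c ≠ '\n' := fun h => hl (h ▸ List.mem_cons_self)
      have hpre : List.isPrefixOf ['\n'] (c :: rest) = false := by
        simp [List.isPrefixOf]; intro h; exact absurd h.symm hc
      simp only [PySem.Chars.splitOn.go, hpre, Bool.false_eq_true, if_false]
      rw [ih rest (c :: cur) (fun h => hl (List.mem_cons_of_mem _ h))]
      simp

theorem pvSplitSingle (cs : List Char) (h : '\n' ∉ cs) :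
    PySem.Chars.splitOn cs ['\n'] = [cs] := by
  unfold PySem.Chars.splitOn
  rw [pvGoNoNl _ _ _ h]; simp

-- every piece is newline-free, and every non-newline character lands in some piece
theorem pvGoPieces (fuel : Nat) : ∀ (l cur : List Char), l.length ≤ fuel → '\n' ∉ cur →
    (∀ p ∈ PySem.Chars.splitOn.go ['\n'] fuel l cur [], '\n' ∉ p)
  ∧ (∀ c, (c ∈ l ∨ c ∈ cur) → c ≠ '\n' →
        ∃ p ∈ PySem.Chars.splitOn.go ['\n'] fuel l cur [], c ∈ p) := by
  induction fuel with
  | zero =>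
    intro l cur hlen hcur
    have : l = [] := List.eq_nil_of_length_eq_zero (Nat.le_zero.mp hlen)
    subst this
    constructor
    · intro p hp
      simp [PySem.Chars.splitOn.go] at hp
      subst hp; simpa using hcur
    · intro c hc _
      simp at hc
      exact ⟨cur.reverse, by simp [PySem.Chars.splitOn.go], by simpa using hc⟩
  | succ f ih =>
    intro l cur hlen hcur
    cases l with
    | nil =>
      constructor
      · intro p hp
        simp [PySem.Chars.splitOn.go] at hp
        subst hp; simpa using hcur
      · intro c hc _
        simp at hc
        exact ⟨cur.reverse, by simp [PySem.Chars.splitOn.go], by simpa using hc⟩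
    | cons c rest =>
      have hlen' : rest.length ≤ f := Nat.succ_le_succ_iff.mp (by simpa using hlen)
      by_cases hc : c = '\n'
      · subst hc
        have hpre : List.isPrefixOf ['\n'] ('\n' :: rest) = true := by
          simp [List.isPrefixOf]
        obtain ⟨ih1, ih2⟩ := ih rest [] hlen' (by simp)
        constructor
        · intro p hp
          simp only [PySem.Chars.splitOn.go, hpre, if_true] at hp
          rw [pvGoAcc] at hp
          simp at hp
          rcases hp with hp | hp
          · subst hp; simpa using hcur
          · exact ih1 p hp
        · intro c0 hc0 hne
          simp only [PySem.Chars.splitOn.go, hpre, if_true]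
          rw [pvGoAcc]
          rcases hc0 with hc0 | hc0
          · rcases List.mem_cons.mp hc0 with h | h
            · exact absurd h hne
            · obtain ⟨p, hp, hcp⟩ := ih2 c0 (Or.inl h) hne
              exact ⟨p, by simp [hp], hcp⟩
          · exact ⟨cur.reverse, by simp, by simpa using hc0⟩
      · have hpre : List.isPrefixOf ['\n'] (c :: rest) = false := by
          simp [List.isPrefixOf]; intro h; exact absurd h.symm hc
        have hcur' : '\n' ∉ c :: cur := by
          intro h; rcases List.mem_cons.mp h with h | h
          · exact hc h.symm
          · exact hcur h
        obtain ⟨ih1, ih2⟩ := ih rest (c :: cur) hlen' hcur'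
        constructor
        · intro p hp
          simp only [PySem.Chars.splitOn.go, hpre, Bool.false_eq_true, if_false] at hp
          exact ih1 p hp
        · intro c0 hc0 hne
          simp only [PySem.Chars.splitOn.go, hpre, Bool.false_eq_true, if_false]
          apply ih2 c0 _ hne
          rcases hc0 with hc0 | hc0
          · rcases List.mem_cons.mp hc0 with h | h
            · exact Or.inr (h ▸ List.mem_cons_self)
            · exact Or.inl h
          · exact Or.inr (List.mem_cons_of_mem _ hc0)

theorem pvSplitPieces (cs : List Char) : ∀ p ∈ PySem.Chars.splitOn cs ['\n'], '\n' ∉ p := by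
  unfold PySem.Chars.splitOn
  exact (pvGoPieces (cs.length + 1) cs [] (Nat.le_succ _) (by simp)).1

theorem pvSplitCover (cs : List Char) (c : Char) (hc : c ∈ cs) (hne : c ≠ '\n') :
    ∃ p ∈ PySem.Chars.splitOn cs ['\n'], c ∈ p := by
  unfold PySem.Chars.splitOn
  exact (pvGoPieces (cs.length + 1) cs [] (Nat.le_succ _) (by simp)).2 c (Or.inl hc) hne

theorem pvMemDropWhile {p : Char → Bool} {x : Char} : ∀ {l : List Char},
    x ∈ l → p x = false → x ∈ l.dropWhile p := by
  intro l
  induction l with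
  | nil => intro h _; cases h
  | cons a t ih =>
    intro hx hp
    by_cases ha : p a = true
    · rw [List.dropWhile_cons_of_pos ha]
      rcases List.mem_cons.mp hx with h | h
      · exact absurd (h ▸ hp) (by simp [ha])
      · exact ih h hp
    · rw [List.dropWhile_cons_of_neg ha]
      exact hx

theorem pvMemStrip (x : Char) (s : List Char) (hx : x ∈ s)
    (h : PySem.Chars.isspace x = false) : x ∈ PySem.Chars.strip s := by
  unfold PySem.Chars.strip PySem.Chars.rstrip PySem.Chars.lstrip
  have h1 : x ∈ List.dropWhile PySem.Chars.isspace s := pvMemDropWhile hx h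
  have h2 : x ∈ (List.dropWhile PySem.Chars.isspace s).reverse := by simpa using h1
  simpa using pvMemDropWhile h2 h

-- the filtered line list is nonempty when text has a non-whitespace character
theorem pvLinesNe (cs : List Char) (c : Char) (hc : c ∈ cs)
    (hs : PySem.Chars.isspace c = false) :
    (PySem.Chars.splitOn cs ['\n']).filter (fun s => !(PySem.Chars.strip s).isEmpty) ≠ [] := by
  have hne : c ≠ '\n' := by
    intro h; subst h; simp [PySem.Chars.isspace] at hs
  obtain ⟨p, hp, hcp⟩ := pvSplitCover cs c hc hne
  have : p ∈ (PySem.Chars.splitOn cs ['\n']).filter (fun s => !(PySem.Chars.strip s).isEmpty) := by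
    apply List.mem_filter.mpr
    refine ⟨hp, ?_⟩
    have := pvMemStrip c p hcp hs
    simp
    intro h; rw [h] at this; cases this
  intro h; rw [h] at this; cases this

-- the inner recursive call on a surviving line is one plain formatted line
theorem pvGoALine (f : Nat) (line : List Char) (hnl : '\n' ∉ line)
    (hs : (!(PySem.Chars.strip line).isEmpty) = true) :
    pvGoA (f + 1) "" line = pvFmtLine [] line := by
  simp only [pvGoA, pvSplitSingle line hnl, List.filter_cons, hs, List.filter_nil, if_true]
  simp [PySem.List.pyGet?, PySem.List.pyIdx?, PySem.List.slice_from, PySem.Chars.join_nil,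
        pvFmtLine, pvPad20]

theorem pvJoinCons (a : List Char) (t : List (List Char)) :
    PySem.Chars.join [] (a :: t) = a ++ PySem.Chars.join [] t := by
  cases t with
  | nil => simp [PySem.Chars.join_singleton, PySem.Chars.join_nil]
  | cons b t' => rw [PySem.Chars.join_cons_cons]; simp

theorem pvEnumTail (header : List Char) : ∀ (rest : List (List Char)) (n : Int), 1 ≤ n →
    (PySem.List.enumerate rest n).map (fun p => pvFmtLine (if p.1 == 0 then header else []) p.2)
      = rest.map (fun line => pvFmtLine [] line) := by
  intro rest
  induction rest with
  | nil => intro n _; simp [PySem.List.enumerate]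
  | cons a t ih =>
    intro n hn
    have hne : (n == 0) = false := by simp; omega
    simp only [PySem.List.enumerate, List.map_cons, hne, Bool.false_eq_true, if_false]
    rw [ih (n + 1) (by omega)]

-- the heart of the equivalence, on char lists
theorem pvMain (key : String) (cs : List Char)
    (h : ∃ c ∈ cs, PySem.Chars.isspace c = false) :
    pvGoA (cs.length + 1) key cs
      = PySem.Chars.join []
          ((PySem.List.enumerate ((PySem.Chars.splitOn cs ['\n']).filter
               (fun s => !(PySem.Chars.strip s).isEmpty))).map
            (fun p => pvFmtLine
              (if p.1 == 0 then (if key ≠ "" then key.toList ++ [':'] else []) else []) p.2)) := by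
  obtain ⟨c, hc, hcs⟩ := h
  obtain ⟨l0, rest, hL⟩ :=
    List.exists_cons_of_ne_nil (pvLinesNe cs c hc hcs)
  have hcsne : cs ≠ [] := by
    intro hnil; subst hnil; cases hc
  obtain ⟨k, hk⟩ : ∃ k, cs.length = k + 1 :=
    ⟨cs.length - 1, by have := List.length_pos_of_ne_nil hcsne; omega⟩
  have hrest : ∀ line ∈ rest, pvGoA cs.length "" line = pvFmtLine [] line := by
    intro line hline
    have hmem : line ∈ (PySem.Chars.splitOn cs ['\n']).filter
        (fun s => !(PySem.Chars.strip s).isEmpty) := by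
      rw [hL]; exact List.mem_cons_of_mem _ hline
    have hsplit := (List.mem_filter.mp hmem).1
    have hkeep := (List.mem_filter.mp hmem).2
    rw [hk]
    exact pvGoALine k line (pvSplitPieces cs line hsplit) hkeep
  -- left side
  conv_lhs => rw [pvGoA]
  rw [hL]
  -- right side
  rw [show PySem.List.enumerate (l0 :: rest) 0 = (0, l0) :: PySem.List.enumerate rest 1 by
        simp [PySem.List.enumerate],
      List.map_cons, pvJoinCons, pvEnumTail _ rest 1 (le_refl 1)]
  simp only [PySem.List.pyGet?, PySem.List.pyIdx?,
    PySem.List.slice_from (l0 :: rest) (by norm_num : (0:Int) ≤ 1),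
    show Int.toNat 1 = 1 from rfl, List.drop_succ_cons, List.drop_zero]
  rw [List.map_congr_left hrest]
  simp only [pvFmtLine, pvPad20]
  simp
  refine congrArg _ (List.map_congr_left ?_)
  intro line _
  simp [pvFmtLine]

-- ===== VERDICT (by name: the statement is the Claim_ definition above) =====
theorem comment_out_py_spec : Claim_equal_comment_out_py := by
  intro key text _ hpre
  unfold Spec_comment_out_py comment_out_py comment_out_py_alt
  have h : ∃ c ∈ text.toList, PySem.Chars.isspace c = false := by
    unfold Pre_comment_out_py at hpre
    simpa using hpre
  rw [pvMain key text.toList h]
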